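-- pv_equiv track=rewrite | github.com/PR713/university-courses | algorithms-and-data-structures/WDI/64.a.popr_suma_max_podciąg.py | max_podciag
-- ===== SOURCE A (Python) =====
-- def max_podciag(T):
--     n = len(T)
--     sum_max = 0
--     for i in range(n):
--         for j in range(n):
--             sum1 = T[i][j]
--             sum2 = T[i][j]
--             for k in range(1, 11):
--                 if i + k >= n: break
--                 sum1 += T[i + k][j]
--                 sum_max = max(sum1,sum_max)
--             for k in range(1, 11):
--                 if j + k >= n: break
--                 sum2 += T[i][j + k]
--                 sum_max = max(sum2,sum_max)
--     return sum_max
-- ===== SOURCE B (Python) =====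
-- def max_podciag(T):
--     n = len(T)
--     # lines to scan: each row clipped to the first n cells, then each column
--     lines = [row[:n] for row in T]
--     lines += [[T[i][j] for i in range(n)] for j in range(n)]
--     best = 0
--     for seq in lines:
--         # prefix sums of the line
--         p = [0]
--         s = 0
--         for x in seq:
--             s += x
--             p.append(s)
--         # every run of length 2..11 is a difference of two prefix sums
--         for a in range(n):
--             for L in range(2, min(11, n - a) + 1):
--                 best = max(best, p[a + L] - p[a])
--     return best
-- ===== Notes on version B (the rewrite author's own statement) =====
-- stated objective: alternative
-- what changed: B extracts each row (clipped to n) and each column as a line, builds its prefix-sum array once, and takes every run of length 2..11 as a difference of two prefix sums, instead of A's per-cell running sums with break; Pre_ excludes ragged grids whose first len(T) rows are shorter than len(T), on which A raises IndexError.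
import Mathlib
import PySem

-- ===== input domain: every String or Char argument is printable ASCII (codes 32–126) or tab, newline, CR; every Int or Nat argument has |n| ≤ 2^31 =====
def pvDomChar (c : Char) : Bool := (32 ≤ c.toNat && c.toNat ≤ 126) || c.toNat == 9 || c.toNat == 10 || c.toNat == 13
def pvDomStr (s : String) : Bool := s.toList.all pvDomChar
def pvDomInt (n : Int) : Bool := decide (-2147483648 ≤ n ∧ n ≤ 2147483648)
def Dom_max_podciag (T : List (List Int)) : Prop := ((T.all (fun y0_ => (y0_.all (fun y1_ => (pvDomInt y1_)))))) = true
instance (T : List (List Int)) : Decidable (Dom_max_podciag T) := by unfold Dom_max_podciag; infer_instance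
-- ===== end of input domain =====

-- B replaces A's per-cell running sums (with break) by per-line prefix-sum arrays:
-- each row/column becomes a line, and every run of length 2..11 is a difference of
-- two prefix sums.  Objective: alternative decomposition (same asymptotic cost).

-- shared indexing helper: T[i][j]; exact for the 0 ≤ i,j in-range accesses both
-- programs make on inputs satisfying Pre_max_podciag
def pvGet (T : List (List Int)) (i j : Nat) : Int := (T.getD i []).getD j 0

-- ===== PORT A =====
-- 'for k in range(1,11): if i+k>=n: break; sum1 += T[i+k][j]; sum_max = max(sum1,sum_max)'
def aLoopV (T : List (List Int)) (n i j : Nat) : List Nat → Int × Int → Int × Int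
  | [], sm => sm
  | k :: ks, (s, m) =>
    if n ≤ i + k then (s, m)
    else aLoopV T n i j ks (s + pvGet T (i + k) j, max (s + pvGet T (i + k) j) m)

def aLoopH (T : List (List Int)) (n i j : Nat) : List Nat → Int × Int → Int × Int
  | [], sm => sm
  | k :: ks, (s, m) =>
    if n ≤ j + k then (s, m)
    else aLoopH T n i j ks (s + pvGet T i (j + k), max (s + pvGet T i (j + k)) m)

def max_podciag (T : List (List Int)) : Int :=
  let n := T.length
  (List.range n).foldl (fun sm i =>
    (List.range n).foldl (fun sm j =>
      let s0 := pvGet T i j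
      let m1 := (aLoopV T n i j (List.range' 1 10) (s0, sm)).2
      (aLoopH T n i j (List.range' 1 10) (s0, m1)).2) sm) 0

-- ===== PORT B =====
-- 'p = [0]; s = 0; for x in seq: s += x; p.append(s)'
def prefixSums (seq : List Int) : List Int :=
  (seq.foldl (fun (sp : List Int × Int) x => (sp.1 ++ [sp.2 + x], sp.2 + x)) ([0], 0)).1

-- 'for a in range(n): for L in range(2, min(11, n-a)+1): best = max(best, p[a+L]-p[a])'
def scanLine (n : Nat) (best : Int) (seq : List Int) : Int :=
  let p := prefixSums seq
  (List.range n).foldl (fun b a =>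
    (List.range' 2 (min 11 (n - a) - 1)).foldl (fun b L =>
      max b (p.getD (a + L) 0 - p.getD a 0)) b) best

def max_podciag_alt (T : List (List Int)) : Int :=
  let n := T.length
  -- rows clipped to n cells (row[:n], exact for nonnegative bound), then columns
  let lines := T.map (fun row => row.take n) ++
    (List.range n).map (fun j => (List.range n).map (fun i => pvGet T i j))
  lines.foldl (scanLine n) 0

-- ===== PRECONDITION & SPEC =====
-- Pre_ excludes ragged grids with a row shorter than len(T): A raises IndexError there.
def Pre_max_podciag (T : List (List Int)) : Prop := ∀ row ∈ T, T.length ≤ row.length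
instance (T : List (List Int)) : Decidable (Pre_max_podciag T) := by unfold Pre_max_podciag; infer_instance

def pvWitness_max_podciag : List (List Int) := [[1, -2], [3, 4]]

def Spec_max_podciag (T : List (List Int)) (out : Int) : Prop := out = max_podciag_alt T
instance (T : List (List Int)) (out : Int) : Decidable (Spec_max_podciag T out) := by unfold Spec_max_podciag; infer_instance

-- ===== CLAIM (what is proved, stated in full; the proofs are below) =====
def Claim_equal_max_podciag : Prop := ∀ (T : List (List Int)), Dom_max_podciag T → Pre_max_podciag T → Spec_max_podciag T (max_podciag T)

-- ===== LEMMAS AND PROOFS =====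

-- the sum of the run of length L starting at position a of a line
def win (seq : List Int) (a L : Nat) : Int := ((seq.drop a).take L).sum

def rowSeq (T : List (List Int)) (i : Nat) : List Int :=
  (List.range T.length).map (fun j => pvGet T i j)

def colSeq (T : List (List Int)) (j : Nat) : List Int :=
  (List.range T.length).map (fun i => pvGet T i j)

-- all candidate run sums of one line
def lineCands (n : Nat) (seq : List Int) : List Int :=
  (List.range n).flatMap (fun a =>
    (List.range' 2 (min 11 (n - a) - 1)).map (fun L => win seq a L))

theorem foldl_max_perm {l l' : List Int} (h : l.Perm l') :
    ∀ a : Int, List.foldl max a l = List.foldl max a l' := by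
  induction h with
  | nil => intro a; rfl
  | cons x _ ih => intro a; simpa [List.foldl] using ih (max a x)
  | swap x y l => intro a; simp [List.foldl, max_comm, max_left_comm]
  | trans _ _ ih₁ ih₂ => intro a; rw [ih₁, ih₂]

theorem foldl_max_flatMap {α : Type} (l : List α) (f : α → List Int) : ∀ a : Int,
    List.foldl max a (l.flatMap f) = l.foldl (fun b x => List.foldl max b (f x)) a := by
  induction l with
  | nil => intro a; rfl
  | cons x xs ih => intro a; simp [List.flatMap_cons, List.foldl_append, ih]

-- permutation plumbing
theorem perm_flatMap_congr {α : Type} {f g : α → List Int} (l : List α)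
    (h : ∀ x ∈ l, (f x).Perm (g x)) : (l.flatMap f).Perm (l.flatMap g) := by
  induction l with
  | nil => exact List.Perm.refl _
  | cons x xs ih =>
    simp only [List.flatMap_cons]
    exact (h x (by simp)).append (ih fun y hy => h y (by simp [hy]))

theorem perm_flatMap_append {α : Type} (l : List α) (f g : α → List Int) :
    (l.flatMap (fun x => f x ++ g x)).Perm (l.flatMap f ++ l.flatMap g) := by
  induction l with
  | nil => exact List.Perm.refl _
  | cons x xs ih =>
    simp only [List.flatMap_cons, List.append_assoc]
    exact (List.Perm.refl (f x)).append
      (((List.Perm.refl (g x)).append ih).trans (List.perm_append_comm_assoc _ _ _))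

theorem perm_flatMap_swap {α β : Type} (l₁ : List α) (l₂ : List β) (h : α → β → List Int) :
    (l₁.flatMap fun i => l₂.flatMap fun j => h i j).Perm
      (l₂.flatMap fun j => l₁.flatMap fun i => h i j) := by
  induction l₁ with
  | nil => simp
  | cons x xs ih =>
    simp only [List.flatMap_cons]
    exact ((List.Perm.refl _).append ih).trans (perm_flatMap_append l₂ _ _).symm

-- reindexing k ↦ k+1
theorem map_range'_succ {α : Type} (f : Nat → α) : ∀ (c a : Nat),
    (List.range' a c).map (fun k => f (k + 1)) = (List.range' (a + 1) c).map f := by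
  intro c
  induction c with
  | zero => intro a; rfl
  | succ c ih => intro a; simp [List.range'_succ, ih]

theorem win_one (seq : List Int) (a : Nat) (h : a < seq.length) :
    win seq a 1 = seq.getD a 0 := by
  simp [win, List.take_one, List.head?_drop, List.getElem?_eq_getElem h]

theorem win_succ (seq : List Int) (a c : Nat) (h : a + c < seq.length) :
    win seq a (c + 1) = win seq a c + seq.getD (a + c) 0 := by
  have h' : c < (seq.drop a).length := by simp; omega
  simp [win, List.take_add_one, List.getElem?_eq_getElem h', List.getElem_drop,
    List.getElem?_eq_getElem h]

-- getD on mapped ranges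
theorem getD_map_range' (f : Nat → Int) (a L t : Nat) (d : Int) (h : t < L) :
    ((List.range' a L).map f).getD t d = f (a + t) := by
  rw [List.getD_eq_getElem _ _ (by simpa using h)]
  simp

theorem getD_map_range (f : Nat → Int) (n t : Nat) (d : Int) (h : t < n) :
    ((List.range n).map f).getD t d = f t := by
  rw [List.getD_eq_getElem _ _ (by simpa using h)]
  simp

-- ---- A's inner loops compute fold-max over window sums ----

theorem aLoopV_spec (T : List (List Int)) (i j : Nat) : ∀ (m a : Nat) (M : Int),
    (aLoopV T T.length i j (List.range' a m) (win (colSeq T j) i a, M)).2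
      = List.foldl max M ((List.range' a (min m (T.length - i - a))).map
          (fun k => win (colSeq T j) i (k + 1))) := by
  intro m
  induction m with
  | zero => intro a M; simp [aLoopV]
  | succ m ih =>
    intro a M
    rw [List.range'_succ]
    by_cases hb : T.length ≤ i + a
    · have h0 : min (m + 1) (T.length - i - a) = 0 := by omega
      simp [aLoopV, hb, h0]
    · have hlt : i + a < T.length := by omega
      have hwin : win (colSeq T j) i a + pvGet T (i + a) j = win (colSeq T j) i (a + 1) := by
        rw [show pvGet T (i + a) j = (colSeq T j).getD (i + a) 0 by
          rw [colSeq, getD_map_range _ _ _ _ hlt]]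
        exact (win_succ _ _ _ (by simpa [colSeq] using hlt)).symm
      have hmin : min (m + 1) (T.length - i - a) = min m (T.length - i - (a + 1)) + 1 := by omega
      simp only [aLoopV, if_neg hb]
      rw [hwin, ih (a + 1) (max (win (colSeq T j) i (a + 1)) M), hmin, List.range'_succ,
        List.map_cons, List.foldl_cons, max_comm M]

theorem aLoopH_spec (T : List (List Int)) (i j : Nat) : ∀ (m a : Nat) (M : Int),
    (aLoopH T T.length i j (List.range' a m) (win (rowSeq T i) j a, M)).2
      = List.foldl max M ((List.range' a (min m (T.length - j - a))).map
          (fun k => win (rowSeq T i) j (k + 1))) := by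
  intro m
  induction m with
  | zero => intro a M; simp [aLoopH]
  | succ m ih =>
    intro a M
    rw [List.range'_succ]
    by_cases hb : T.length ≤ j + a
    · have h0 : min (m + 1) (T.length - j - a) = 0 := by omega
      simp [aLoopH, hb, h0]
    · have hlt : j + a < T.length := by omega
      have hwin : win (rowSeq T i) j a + pvGet T i (j + a) = win (rowSeq T i) j (a + 1) := by
        rw [show pvGet T i (j + a) = (rowSeq T i).getD (j + a) 0 by
          rw [rowSeq, getD_map_range _ _ _ _ hlt]]
        exact (win_succ _ _ _ (by simpa [rowSeq] using hlt)).symm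
      have hmin : min (m + 1) (T.length - j - a) = min m (T.length - j - (a + 1)) + 1 := by omega
      simp only [aLoopH, if_neg hb]
      rw [hwin, ih (a + 1) (max (win (rowSeq T i) j (a + 1)) M), hmin, List.range'_succ,
        List.map_cons, List.foldl_cons, max_comm M]

-- the vertical / horizontal candidates contributed by cell (i, j)
def Vcands (T : List (List Int)) (i j : Nat) : List Int :=
  (List.range' 2 (min 11 (T.length - i) - 1)).map (fun L => win (colSeq T j) i L)

def Hcands (T : List (List Int)) (i j : Nat) : List Int :=
  (List.range' 2 (min 11 (T.length - j) - 1)).map (fun L => win (rowSeq T i) j L)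

theorem cellA (T : List (List Int)) (i j : Nat) (hi : i < T.length) (hj : j < T.length)
    (sm : Int) :
    (aLoopH T T.length i j (List.range' 1 10)
      (pvGet T i j, (aLoopV T T.length i j (List.range' 1 10) (pvGet T i j, sm)).2)).2
    = List.foldl max sm (Vcands T i j ++ Hcands T i j) := by
  have hv : pvGet T i j = win (colSeq T j) i 1 := by
    rw [win_one _ _ (by simpa [colSeq] using hi), colSeq, getD_map_range _ _ _ _ hi]
  have hh : pvGet T i j = win (rowSeq T i) j 1 := by
    rw [win_one _ _ (by simpa [rowSeq] using hj), rowSeq, getD_map_range _ _ _ _ hj]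
  have e1 : min 11 (T.length - i) - 1 = min 10 (T.length - i - 1) := by omega
  have e2 : min 11 (T.length - j) - 1 = min 10 (T.length - j - 1) := by omega
  have hV2 : (aLoopV T T.length i j (List.range' 1 10) (pvGet T i j, sm)).2
      = List.foldl max sm (Vcands T i j) := by
    rw [hv, aLoopV_spec T i j 10 1 sm]
    simp only [Vcands, e1]
    exact congrArg (List.foldl max sm) (map_range'_succ (fun L => win (colSeq T j) i L) _ 1)
  rw [List.foldl_append, hV2, hh, aLoopH_spec T i j 10 1]
  simp only [Hcands, e2]
  exact congrArg _ (map_range'_succ (fun L => win (rowSeq T i) j L) _ 1)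

theorem portA_eq (T : List (List Int)) :
    max_podciag T = List.foldl max 0 ((List.range T.length).flatMap (fun i =>
      (List.range T.length).flatMap (fun j => Vcands T i j ++ Hcands T i j))) := by
  simp only [max_podciag]
  rw [foldl_max_flatMap]
  apply PySem.List.foldl_congr_mem
  intro sm i hi
  rw [foldl_max_flatMap]
  apply PySem.List.foldl_congr_mem
  intro b j hj
  exact cellA T i j (List.mem_range.mp hi) (List.mem_range.mp hj) b

-- ---- B's prefix sums and line scan ----

theorem prefAux (seq : List Int) : ∀ (p0 : List Int) (s0 : Int),
    (seq.foldl (fun (sp : List Int × Int) x => (sp.1 ++ [sp.2 + x], sp.2 + x)) (p0, s0)).1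
      = p0 ++ (List.range' 1 seq.length).map (fun t => s0 + (seq.take t).sum) := by
  induction seq with
  | nil => intro p0 s0; simp
  | cons x xs ih =>
    intro p0 s0
    rw [List.foldl_cons, ih, List.length_cons, List.range'_succ, List.map_cons,
      ← map_range'_succ (fun t => s0 + (((x :: xs)).take t).sum) xs.length 1]
    simp [List.take_succ_cons, add_assoc]

theorem prefixSums_getD (seq : List Int) (t : Nat) (h : t ≤ seq.length) :
    (prefixSums seq).getD t 0 = (seq.take t).sum := by
  rw [prefixSums, prefAux]
  cases t with
  | zero => simp
  | succ t =>
    rw [show ([(0 : Int)] ++ (List.range' 1 seq.length).map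
        (fun t => 0 + (seq.take t).sum)).getD (t + 1) 0
      = ((List.range' 1 seq.length).map (fun t => 0 + (seq.take t).sum)).getD t 0 from rfl]
    rw [getD_map_range' _ _ _ _ _ (by omega)]
    simp [Nat.add_comm]

theorem win_eq_pref (seq : List Int) (a L : Nat) (h : a + L ≤ seq.length) :
    (prefixSums seq).getD (a + L) 0 - (prefixSums seq).getD a 0 = win seq a L := by
  rw [prefixSums_getD _ _ h, prefixSums_getD _ _ (by omega), win, List.take_add]
  simp

theorem scanLine_spec (n : Nat) (seq : List Int) (h : seq.length = n) (b : Int) :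
    scanLine n b seq = List.foldl max b (lineCands n seq) := by
  simp only [scanLine, lineCands]
  rw [foldl_max_flatMap]
  apply PySem.List.foldl_congr_mem
  intro acc a ha
  rw [List.foldl_map]
  apply PySem.List.foldl_congr_mem
  intro b' L hL
  have ha' := List.mem_range.mp ha
  have hL' := List.mem_range'_1.mp hL
  rw [win_eq_pref seq a L (by omega)]

theorem portB_eq (T : List (List Int)) (hpre : Pre_max_podciag T) :
    max_podciag_alt T = List.foldl max 0 (
      (List.range T.length).flatMap (fun i => lineCands T.length (rowSeq T i)) ++
      (List.range T.length).flatMap (fun j => lineCands T.length (colSeq T j))) := by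
  have hrows : T.map (fun row => row.take T.length) = (List.range T.length).map (rowSeq T) := by
    apply List.ext_getElem (by simp)
    intro i h1 h2
    have hiT : i < T.length := by simpa using h1
    have hlen : T.length ≤ (T[i]'hiT).length := hpre (T[i]'hiT) (List.getElem_mem hiT)
    simp only [List.getElem_map, List.getElem_range]
    apply List.ext_getElem
    · simp [rowSeq]; omega
    intro k hk1 hk2
    have hk : k < T.length := by simpa [rowSeq] using hk2
    simp only [List.getElem_take, rowSeq, List.getElem_map, List.getElem_range]
    rw [pvGet, List.getD_eq_getElem _ _ hiT, List.getD_eq_getElem _ _ (by omega)]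
  have hfold : ∀ (lines : List (List Int)) (b : Int),
      (∀ seq ∈ lines, seq.length = T.length) →
      List.foldl (scanLine T.length) b lines
        = List.foldl max b (lines.flatMap (lineCands T.length)) := by
    intro lines b hlen
    rw [foldl_max_flatMap]
    exact PySem.List.foldl_congr_mem _ _ _ _
      (fun acc seq hs => scanLine_spec _ _ (hlen seq hs) acc)
  have hmem : ∀ seq ∈ (List.range T.length).map (rowSeq T) ++
      (List.range T.length).map (colSeq T), seq.length = T.length := by
    intro seq hs
    rcases List.mem_append.mp hs with h | h <;>
      rcases List.mem_map.mp h with ⟨x, _, rfl⟩ <;> simp [rowSeq, colSeq]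
  simp only [max_podciag_alt]
  rw [hrows, show (fun j => (List.range T.length).map (fun i => pvGet T i j)) = colSeq T from rfl,
    hfold _ 0 hmem, List.flatMap_append, List.flatMap_map, List.flatMap_map]

theorem candPerm (T : List (List Int)) :
    ((List.range T.length).flatMap (fun i =>
      (List.range T.length).flatMap (fun j => Vcands T i j ++ Hcands T i j))).Perm
    ((List.range T.length).flatMap (fun i => lineCands T.length (rowSeq T i)) ++
      (List.range T.length).flatMap (fun j => lineCands T.length (colSeq T j))) := by
  have h1 : ((List.range T.length).flatMap (fun i =>
      (List.range T.length).flatMap (fun j => Vcands T i j ++ Hcands T i j))).Perm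
      ((List.range T.length).flatMap (fun i =>
        ((List.range T.length).flatMap (fun j => Vcands T i j)) ++
        ((List.range T.length).flatMap (fun j => Hcands T i j)))) :=
    perm_flatMap_congr _ (fun i _ => perm_flatMap_append _ _ _)
  refine (h1.trans ((perm_flatMap_append _ _ _).trans ?_))
  have hH : (List.range T.length).flatMap (fun i =>
      (List.range T.length).flatMap (fun j => Hcands T i j))
      = (List.range T.length).flatMap (fun i => lineCands T.length (rowSeq T i)) := by
    simp only [Hcands, lineCands]
  have hV : (List.range T.length).flatMap (fun j =>
      (List.range T.length).flatMap (fun i => Vcands T i j))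
      = (List.range T.length).flatMap (fun j => lineCands T.length (colSeq T j)) := by
    simp only [Vcands, lineCands]
  refine ((List.Perm.append (perm_flatMap_swap _ _ _) (List.Perm.refl _)).trans ?_)
  rw [hV, hH]
  exact List.perm_append_comm

-- ===== VERDICT (by name: the statement is the Claim_ definition above) =====
theorem max_podciag_spec : Claim_equal_max_podciag := by
  intro T _ hpre
  unfold Spec_max_podciag
  rw [portA_eq, portB_eq T hpre]
  exact foldl_max_perm (candPerm T) 0
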